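-- pv_equiv track=rewrite | github.com/Elsaa12/PROGRAM-ENKRIPSI-DAN-DESKRIPSI | PDA4#K1(5).py | pad_key
-- ===== SOURCE A (Python) =====
-- def pad_key(teks, kunci):
--     padded_kunci = ''
--     i = 0
--     for char in teks:
--         if char.isalpha():
--             padded_kunci += kunci[i % len(kunci)]
--             i += 1
--         else:
--             padded_kunci += ' '
--     return padded_kunci
-- ===== SOURCE B (Python) =====
-- def pad_key(teks, kunci):
--     count = sum(1 for ch in teks if ch.isalpha())
--     keystream = [kunci[j % len(kunci)] for j in range(count)]
--     it = iter(keystream)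
--     return ''.join(next(it) if ch.isalpha() else ' ' for ch in teks)
-- ===== Notes on version B (the rewrite author's own statement) =====
-- stated objective: alternative
-- what changed: B replaces A's single interleaving pass with mutable string/index state by a two-pass decomposition: it first counts the alphabetic characters, builds the whole repeating-key keystream once as a list, and then weaves that stream into the text in a second pass.
import Mathlib
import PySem

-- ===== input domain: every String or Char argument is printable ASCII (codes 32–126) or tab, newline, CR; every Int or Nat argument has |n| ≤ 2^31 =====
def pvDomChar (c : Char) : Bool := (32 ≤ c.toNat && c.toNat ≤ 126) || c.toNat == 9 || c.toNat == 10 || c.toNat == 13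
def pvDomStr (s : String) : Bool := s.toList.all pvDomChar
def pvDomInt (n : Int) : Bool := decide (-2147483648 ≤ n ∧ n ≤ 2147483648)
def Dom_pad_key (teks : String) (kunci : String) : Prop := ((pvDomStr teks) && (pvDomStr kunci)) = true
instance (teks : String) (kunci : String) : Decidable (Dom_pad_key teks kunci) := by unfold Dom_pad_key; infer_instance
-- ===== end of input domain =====

-- B builds the whole keystream once (count alphabetic chars, then kunci[j % len] for j < count) and
-- weaves it into the text in a second pass, instead of A's single pass with mutable index state.

-- ===== PORT A =====
-- A: one pass, accumulating the padded key and a running key index i.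
def pad_key (teks : String) (kunci : String) : String :=
  let kl := kunci.toList
  let res := teks.toList.foldl
    (fun (st : List Char × Int) c =>
      if PySem.Chars.isalpha c then
        (st.1 ++ [(PySem.List.pyGet? kl (PySem.Int.mod st.2 kl.length)).getD ' '], st.2 + 1)
      else
        (st.1 ++ [' '], st.2))
    ([], 0)
  String.mk res.1

-- ===== PORT B =====
-- weave: consume one keystream element per alphabetic char, ' ' otherwise (B's join over next(it)).
def padWeave : List Char → List Char → List Char
  | [], _ => []
  | c :: cs, ks =>
    if PySem.Chars.isalpha c then ks.headD ' ' :: padWeave cs ks.tail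
    else ' ' :: padWeave cs ks

def pad_key_alt (teks : String) (kunci : String) : String :=
  let kl := kunci.toList
  let count := teks.toList.countP (fun c => PySem.Chars.isalpha c)
  let keystream := (PySem.List.pyRange 0 (count : Int) 1).map
    (fun j => (PySem.List.pyGet? kl (PySem.Int.mod j kl.length)).getD ' ')
  String.mk (padWeave teks.toList keystream)

-- ===== PRECONDITION & SPEC =====
-- Pre_ excludes exactly the inputs where A raises ZeroDivisionError (empty kunci with at least one
-- alphabetic char in teks); B raises there too.
def Pre_pad_key (teks : String) (kunci : String) : Prop :=
  kunci ≠ "" ∨ teks.toList.all (fun c => !PySem.Chars.isalpha c) = true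
instance (teks : String) (kunci : String) : Decidable (Pre_pad_key teks kunci) := by
  unfold Pre_pad_key; infer_instance
def pvWitness_pad_key : String × String := ("ab c!", "key")

def Spec_pad_key (teks : String) (kunci : String) (out : String) : Prop := out = pad_key_alt teks kunci
instance (teks : String) (kunci : String) (out : String) : Decidable (Spec_pad_key teks kunci out) := by unfold Spec_pad_key; infer_instance

-- ===== CLAIM (what is proved, stated in full; the proofs are below) =====
def Claim_equal_pad_key : Prop := ∀ (teks : String) (kunci : String), Dom_pad_key teks kunci → Pre_pad_key teks kunci → Spec_pad_key teks kunci (pad_key teks kunci)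

-- ===== LEMMAS AND PROOFS =====

-- A's padded key, written as a structural recursion with explicit start index.
def weaveFrom (kl : List Char) : List Char → Int → List Char
  | [], _ => []
  | c :: cs, i =>
    if PySem.Chars.isalpha c then
      (PySem.List.pyGet? kl (PySem.Int.mod i kl.length)).getD ' ' :: weaveFrom kl cs (i + 1)
    else ' ' :: weaveFrom kl cs i

theorem foldA_eq_weaveFrom (kl : List Char) (ts : List Char) (acc : List Char) (i : Int) :
    (ts.foldl
      (fun (st : List Char × Int) c =>
        if PySem.Chars.isalpha c then
          (st.1 ++ [(PySem.List.pyGet? kl (PySem.Int.mod st.2 kl.length)).getD ' '], st.2 + 1)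
        else
          (st.1 ++ [' '], st.2))
      (acc, i)).1 = acc ++ weaveFrom kl ts i := by
  induction ts generalizing acc i with
  | nil => simp [weaveFrom]
  | cons c cs ih =>
    by_cases h : PySem.Chars.isalpha c = true <;>
      simp [weaveFrom, h, ih, List.append_assoc]

theorem padWeave_keystream (kl : List Char) (ts : List Char) (i : Int) :
    padWeave ts ((PySem.List.pyRange i (i + ts.countP (fun c => PySem.Chars.isalpha c)) 1).map
      (fun j => (PySem.List.pyGet? kl (PySem.Int.mod j kl.length)).getD ' '))
    = weaveFrom kl ts i := by
  induction ts generalizing i with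
  | nil => simp [padWeave, weaveFrom, PySem.List.pyRange_one_eq_nil]
  | cons c cs ih =>
    by_cases h : PySem.Chars.isalpha c = true
    · have hcnt : ((c :: cs).countP (fun c => PySem.Chars.isalpha c) : Int)
          = (cs.countP (fun c => PySem.Chars.isalpha c) : Int) + 1 := by
        simp [h]
      have hlt : i < i + ((c :: cs).countP (fun c => PySem.Chars.isalpha c) : Int) := by
        rw [hcnt]; have : (0 : Int) ≤ (cs.countP (fun c => PySem.Chars.isalpha c) : Int) :=
          Int.natCast_nonneg _
        omega
      rw [PySem.List.pyRange_one_cons hlt]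
      have harg : i + ((c :: cs).countP (fun c => PySem.Chars.isalpha c) : Int)
          = (i + 1) + (cs.countP (fun c => PySem.Chars.isalpha c) : Int) := by
        rw [hcnt]; ring
      simp only [List.map_cons, padWeave, h, if_pos, List.headD_cons, List.tail_cons,
        weaveFrom, harg, ih]
    · have hcnt : ((c :: cs).countP (fun c => PySem.Chars.isalpha c) : Int)
          = (cs.countP (fun c => PySem.Chars.isalpha c) : Int) := by
        simp [h]
      simp only [padWeave, h, weaveFrom, if_neg, Bool.false_eq_true, not_false_iff, hcnt, ih]

-- ===== VERDICT (by name: the statement is the Claim_ definition above) =====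
theorem pad_key_spec : Claim_equal_pad_key := by
  intro teks kunci _ _
  unfold Spec_pad_key pad_key pad_key_alt
  simp only
  rw [foldA_eq_weaveFrom, List.nil_append]
  have := padWeave_keystream kunci.toList teks.toList 0
  rw [Int.zero_add] at this
  rw [this]
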